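-- pv_equiv track=rewrite | github.com/Zzpecter/Codewars | PickPeaks.py | pick_peaks
-- ===== SOURCE A (Python) =====
-- def pick_peaks(input_list):
--     positions, peaks = [], []
--     reference_min = input_list[0]
--     reference_max = input_list[0]
--     state = 'falling'  # rising or falling
--     index = 0
--
--     for value in input_list:
--         if state == 'falling':
--             if value <= reference_min:
--                 reference_min = value
--             else:
--                 reference_max = value
--                 state = 'rising'
--         elif state == 'rising':
--             if value > reference_max:
--                 reference_max = value
--             elif value == reference_max:
--                 pass
--             else:
--                 state = 'falling'
--                 reference_min = value
--                 peaks.append(reference_max)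
--                 positions.append(index-1)
--         index += 1
--     return {'pos': positions, 'peaks': peaks}
-- ===== SOURCE B (Python) =====
-- def pick_peaks(input_list):
--     n = len(input_list)
--     # run-length compress: keep (last index, value) of each maximal run of equal values
--     runs = [(i, v) for i, v in enumerate(input_list)
--             if i == n - 1 or input_list[i + 1] != v]
--     positions, peaks = [], []
--     # a run is a peak iff its value is strictly above both neighbouring runs
--     for (_, a), (j, b), (_, c) in zip(runs, runs[1:], runs[2:]):
--         if a < b > c:
--             positions.append(j)
--             peaks.append(b)
--     return {'pos': positions, 'peaks': peaks}
-- ===== Notes on version B (the rewrite author's own statement) =====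
-- stated objective: alternative
-- what changed: Replaces A's one-pass rising/falling state machine by two declarative stages: run-length-compress the list into (last_index, value) pairs via a filtered enumerate, then emit every run that is a strict local maximum of its two neighbouring runs, read off consecutive triples with zip.
import Mathlib
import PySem

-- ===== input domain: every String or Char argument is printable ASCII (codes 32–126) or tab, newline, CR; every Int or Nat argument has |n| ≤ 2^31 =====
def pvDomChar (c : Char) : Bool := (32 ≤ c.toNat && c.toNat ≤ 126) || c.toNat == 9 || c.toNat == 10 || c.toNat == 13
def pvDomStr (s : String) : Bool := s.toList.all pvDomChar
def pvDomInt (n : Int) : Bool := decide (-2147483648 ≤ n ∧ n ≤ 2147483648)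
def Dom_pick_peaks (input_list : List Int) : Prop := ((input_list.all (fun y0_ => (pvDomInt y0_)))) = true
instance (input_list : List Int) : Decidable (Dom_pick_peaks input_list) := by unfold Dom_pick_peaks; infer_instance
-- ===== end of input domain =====

-- B replaces A's rising/falling state machine by two declarative stages: run-length compression
-- of the input into (last index, value) pairs, then selecting runs that are strict local maxima
-- of their neighbouring runs from consecutive triples; objective: alternative decomposition.


-- ===== PORT A =====
-- loop body of A: state is (positions, peaks, reference_min, reference_max, state, index)
def pickPeaksStepA (s : List Int × List Int × Int × Int × String × Int) (value : Int) :
    List Int × List Int × Int × Int × String × Int :=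
  let (positions, peaks, rmin, rmax, st, index) := s
  if st = "falling" then
    if value ≤ rmin then (positions, peaks, value, rmax, st, index + 1)
    else (positions, peaks, rmin, value, "rising", index + 1)
  else if st = "rising" then
    if value > rmax then (positions, peaks, rmin, value, st, index + 1)
    else if value = rmax then (positions, peaks, rmin, rmax, st, index + 1)
    else (positions ++ [index - 1], peaks ++ [rmax], value, rmax, "falling", index + 1)
  else (positions, peaks, rmin, rmax, st, index + 1)

def pick_peaks (input_list : List Int) : List (String × List Int) :=
  match input_list with
  | [] => []   -- Python raises IndexError reading the first element here; excluded by Pre_pick_peaks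
  | h :: _ =>
    let s := input_list.foldl pickPeaksStepA ([], [], h, h, "falling", 0)
    [("pos", s.1), ("peaks", s.2.1)]

-- ===== PORT B =====
def pick_peaks_alt (input_list : List Int) : List (String × List Int) :=
  let n : Int := input_list.length
  -- the comprehension: Python evaluates input_list[i+1] only when i != n-1, where it is in
  -- range, so pyGet? returning `some` there makes the port exact
  let runs : List (Int × Int) :=
    (PySem.List.enumerate input_list 0).filter
      (fun iv => iv.1 == n - 1 || !(PySem.List.pyGet? input_list (iv.1 + 1) == some iv.2))
  -- zip(runs, runs[1:], runs[2:]) and the append loop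
  let triples := runs.zip ((runs.drop 1).zip (runs.drop 2))
  let s := triples.foldl
    (fun (acc : List Int × List Int) t =>
      if t.1.2 < t.2.1.2 ∧ t.2.1.2 > t.2.2.2 then (acc.1 ++ [t.2.1.1], acc.2 ++ [t.2.1.2])
      else acc)
    ([], [])
  [("pos", s.1), ("peaks", s.2)]

-- ===== PRECONDITION & SPEC =====
-- Pre_ excludes only the empty list, on which A raises IndexError reading the first element.
def Pre_pick_peaks (input_list : List Int) : Prop := input_list ≠ []
instance (input_list : List Int) : Decidable (Pre_pick_peaks input_list) := by unfold Pre_pick_peaks; infer_instance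
def pvWitness_pick_peaks : List Int := ([1, 3, 2])

def Spec_pick_peaks (input_list : List Int) (out : List (String × List Int)) : Prop := out = pick_peaks_alt input_list
instance (input_list : List Int) (out : List (String × List Int)) : Decidable (Spec_pick_peaks input_list out) := by unfold Spec_pick_peaks; infer_instance

-- ===== CLAIM (what is proved, stated in full; the proofs are below) =====
def Claim_equal_pick_peaks : Prop := ∀ (input_list : List Int), Dom_pick_peaks input_list → Pre_pick_peaks input_list → Spec_pick_peaks input_list (pick_peaks input_list)

-- ===== LEMMAS AND PROOFS =====

-- proof-only helper: the first-difference scan (state: positions, peaks, prev, rose, i)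
def pickPeaksStepS (s : List Int × List Int × Int × Bool × Int) (value : Int) :
    List Int × List Int × Int × Bool × Int :=
  let (positions, peaks, prev, rose, i) := s
  if value > prev then (positions, peaks, value, true, i + 1)
  else if value < prev then
    if rose then (positions ++ [i - 1], peaks ++ [prev], value, false, i + 1)
    else (positions, peaks, value, false, i + 1)
  else (positions, peaks, value, rose, i + 1)

-- proof-only helper: run-length compression with the run's last index
def rle : Int → List Int → List (Int × Int)
  | _, [] => []
  | i, [x] => [(i, x)]
  | i, x :: y :: rest => if x = y then rle (i + 1) (y :: rest) else (i, x) :: rle (i + 1) (y :: rest)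

-- proof-only helper: the scan expressed on (index, value) pairs
def scanRuns : Bool → Int → Int → List (Int × Int) → List Int × List Int
  | _, _, _, [] => ([], [])
  | rose, pj, pv, (j, v) :: rest =>
    if v > pv then scanRuns true j v rest
    else if v < pv then
      if rose then
        let (P, K) := scanRuns false j v rest
        (pj :: P, pv :: K)
      else scanRuns false j v rest
    else scanRuns rose j pv rest

-- proof-only helper: local-maximum selection over consecutive triples, cons style
def tripleList : List (Int × Int) → List Int × List Int
  | (_, a) :: (j, b) :: (k, c) :: rest =>
      let (P, K) := tripleList ((j, b) :: (k, c) :: rest)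
      if a < b ∧ b > c then (j :: P, b :: K) else (P, K)
  | _ => ([], [])

-- L1: A's state machine equals the first-difference scan (falling ↔ rose = false, rmin/rmax = prev)
theorem pick_peaks_loop (rest : List Int) :
    ∀ (pos peaks : List Int) (prev rmin rmax : Int) (st : String) (rose : Bool) (i : Int),
    ((st = "falling" ∧ rose = false ∧ rmin = prev) ∨ (st = "rising" ∧ rose = true ∧ rmax = prev)) →
    (rest.foldl pickPeaksStepA (pos, peaks, rmin, rmax, st, i)).1
        = (rest.foldl pickPeaksStepS (pos, peaks, prev, rose, i)).1 ∧
    (rest.foldl pickPeaksStepA (pos, peaks, rmin, rmax, st, i)).2.1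
        = (rest.foldl pickPeaksStepS (pos, peaks, prev, rose, i)).2.1 := by
  induction rest with
  | nil => intro pos peaks prev rmin rmax st rose i h; exact ⟨rfl, rfl⟩
  | cons v rest ih =>
    intro pos peaks prev rmin rmax st rose i h
    rcases h with ⟨hst, hr, hm⟩ | ⟨hst, hr, hm⟩ <;> subst hst <;> subst hr <;> subst hm <;>
      simp only [List.foldl_cons, pickPeaksStepA, pickPeaksStepS, reduceIte] <;>
      split_ifs <;>
      first
        | omega
        | (refine ih _ _ _ _ _ _ _ _ (Or.inl ⟨rfl, rfl, ?_⟩); omega)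
        | (refine ih _ _ _ _ _ _ _ _ (Or.inr ⟨rfl, rfl, ?_⟩); omega)
        | simp_all

-- L2: the scan fold equals scanRuns over the enumerated tail
theorem foldS_eq_scanRuns (xs : List Int) :
    ∀ (pos peaks : List Int) (prev : Int) (rose : Bool) (i : Int),
    (xs.foldl pickPeaksStepS (pos, peaks, prev, rose, i)).1
        = pos ++ (scanRuns rose (i - 1) prev (PySem.List.enumerate xs i)).1 ∧
    (xs.foldl pickPeaksStepS (pos, peaks, prev, rose, i)).2.1
        = peaks ++ (scanRuns rose (i - 1) prev (PySem.List.enumerate xs i)).2 := by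
  induction xs with
  | nil => intro pos peaks prev rose i; simp [PySem.List.enumerate_nil, scanRuns]
  | cons v rest ih =>
    intro pos peaks prev rose i
    rw [PySem.List.enumerate_cons]
    simp only [List.foldl_cons, pickPeaksStepS, scanRuns]
    split_ifs with h1 h2 h3
    · have := ih pos peaks v true (i + 1)
      simpa [Int.add_sub_cancel] using this
    · have := ih (pos ++ [i - 1]) (peaks ++ [prev]) v false (i + 1)
      simp only [Int.add_sub_cancel] at this ⊢
      rcases hsr : scanRuns false i v (PySem.List.enumerate rest (i + 1)) with ⟨P, K⟩
      simp [this, hsr]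
    · have := ih pos peaks v false (i + 1)
      simpa [Int.add_sub_cancel] using this
    · have hv : v = prev := by omega
      subst hv
      have := ih pos peaks v rose (i + 1)
      simpa [Int.add_sub_cancel] using this

-- L3: a duplicated head value can be dropped
theorem scanRuns_dup (rose : Bool) (pj pv j j' v : Int) (L : List (Int × Int)) :
    scanRuns rose pj pv ((j, v) :: (j', v) :: L) = scanRuns rose pj pv ((j', v) :: L) := by
  simp only [scanRuns]
  split_ifs <;> first | rfl | omega

-- L4: scanRuns is invariant under run-length compression
theorem scanRuns_rle (xs : List Int) :
    ∀ (i : Int) (rose : Bool) (pj pv : Int),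
    scanRuns rose pj pv (PySem.List.enumerate xs i) = scanRuns rose pj pv (rle i xs) := by
  induction xs with
  | nil => intro i rose pj pv; simp [PySem.List.enumerate_nil, rle]
  | cons x tail ih =>
    intro i rose pj pv
    match tail with
    | [] => simp [PySem.List.enumerate_cons, PySem.List.enumerate_nil, rle]
    | y :: rest =>
      by_cases hxy : x = y
      · subst hxy
        rw [PySem.List.enumerate_cons, PySem.List.enumerate_cons, rle, if_pos rfl,
          scanRuns_dup, ← PySem.List.enumerate_cons]
        exact ih (i + 1) rose pj pv
      · rw [PySem.List.enumerate_cons, rle, if_neg hxy]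
        have step : ∀ (L L' : List (Int × Int)),
            (∀ (rose' : Bool) (pj' pv' : Int), scanRuns rose' pj' pv' L = scanRuns rose' pj' pv' L') →
            ∀ (rose' : Bool) (pj' pv' : Int),
            scanRuns rose' pj' pv' ((i, x) :: L) = scanRuns rose' pj' pv' ((i, x) :: L') := by
          intro L L' h rose' pj' pv'
          simp only [scanRuns]
          split_ifs <;> simp [h]
        exact step _ _ (fun r p q => ih (i + 1) r p q) rose pj pv

-- L11: the head of rle on a nonempty list carries the first value
theorem rle_head (rest : List Int) :
    ∀ (i y : Int), ∃ j tl, rle i (y :: rest) = (j, y) :: tl := by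
  induction rest with
  | nil => intro i y; exact ⟨i, [], rfl⟩
  | cons z rest ih =>
    intro i y
    by_cases hyz : y = z
    · subst hyz
      obtain ⟨j, tl, h⟩ := ih (i + 1) y
      exact ⟨j, tl, by rw [rle, if_pos rfl]; exact h⟩
    · exact ⟨i, _, by rw [rle, if_neg hyz]⟩

-- L5: rle produces no two consecutive equal values
theorem rle_chain (xs : List Int) :
    ∀ (i : Int), List.IsChain (fun p q : Int × Int => p.2 ≠ q.2) (rle i xs) := by
  induction xs with
  | nil => intro i; simp [rle]
  | cons x tail ih =>
    intro i
    match tail with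
    | [] => simp [rle]
    | y :: rest =>
      by_cases hxy : x = y
      · rw [rle, if_pos hxy]; exact ih (i + 1)
      · rw [rle, if_neg hxy]
        obtain ⟨j, tl, h⟩ := rle_head rest (i + 1) y
        rw [h]
        have := ih (i + 1)
        rw [h] at this
        exact List.IsChain.cons_cons hxy this

-- L6: on consecutive-distinct runs the scan equals the triple selection (with a phantom prefix)
theorem scanRuns_eq_tripleList (r : List (Int × Int)) :
    ∀ (pj pv s x0 : Int) (rose : Bool),
    List.IsChain (fun p q : Int × Int => p.2 ≠ q.2) ((pj, pv) :: r) →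
    rose = decide (s < pv) →
    scanRuns rose pj pv r = tripleList ((x0, s) :: (pj, pv) :: r) := by
  induction r with
  | nil => intro pj pv s x0 rose hch hr; simp [scanRuns, tripleList]
  | cons p rest ih =>
    obtain ⟨j, v⟩ := p
    intro pj pv s x0 rose hch hr
    rw [List.isChain_cons_cons] at hch
    obtain ⟨hne, hch'⟩ := hch
    have hrec : scanRuns (decide (pv < v)) j v rest = tripleList ((pj, pv) :: (j, v) :: rest) :=
      ih j v pv pj (decide (pv < v)) hch' rfl
    subst hr
    rcases hT : tripleList ((pj, pv) :: (j, v) :: rest) with ⟨P, K⟩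
    rw [hT] at hrec
    rcases lt_trichotomy v pv with hlt | heq | hgt
    · by_cases hs : s < pv
      · simp only [scanRuns, tripleList, hT]
        rw [if_neg (by omega), if_pos hlt, if_pos (decide_eq_true hs)]
        have : decide (pv < v) = false := by simp [not_lt.mpr (le_of_lt hlt)]
        rw [this] at hrec
        simp [hrec, hs, hlt]
      · simp only [scanRuns, tripleList, hT]
        rw [if_neg (by omega), if_pos hlt, if_neg (by simpa using hs)]
        have : decide (pv < v) = false := by simp [not_lt.mpr (le_of_lt hlt)]
        rw [this] at hrec
        simp [hrec, hs]
    · exact absurd heq.symm hne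
    · simp only [scanRuns, tripleList, hT]
      rw [if_pos hgt]
      have : decide (pv < v) = true := decide_eq_true hgt
      rw [this] at hrec
      simp [hrec, not_lt.mpr (le_of_lt hgt)]

-- L9': a phantom prefix that cannot rise contributes nothing
theorem tripleList_prefix (x0 s pj pv : Int) (r : List (Int × Int)) (h : ¬ s < pv) :
    tripleList ((x0, s) :: (pj, pv) :: r) = tripleList ((pj, pv) :: r) := by
  match r with
  | [] => simp [tripleList]
  | (j, v) :: rest =>
    rcases hT : tripleList ((pj, pv) :: (j, v) :: rest) with ⟨P, K⟩
    simp [tripleList, hT, h]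

-- L8: starting the scan before the compressed list absorbs into compressing one element earlier
theorem scanRuns_cons_rle (tail : List Int) (i x : Int) :
    scanRuns false i x (rle (i + 1) tail)
      = match rle i (x :: tail) with
        | [] => ([], [])
        | (j, v) :: r => scanRuns false j v r := by
  match tail with
  | [] => simp [rle, scanRuns]
  | y :: rest =>
    by_cases hxy : x = y
    · rw [rle, if_pos hxy]
      obtain ⟨j, tl, h⟩ := rle_head rest (i + 1) y
      rw [h]
      subst hxy
      simp [scanRuns]
    · rw [rle, if_neg hxy]

-- L7: B's filtered enumerate is run-length compression
theorem filter_eq_rle (xs : List Int) :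
    ∀ (full : List Int) (k : Nat), full.drop k = xs → k + xs.length = full.length →
    (PySem.List.enumerate xs (k : Int)).filter
        (fun iv => iv.1 == (full.length : Int) - 1 || !(PySem.List.pyGet? full (iv.1 + 1) == some iv.2))
      = rle (k : Int) xs := by
  induction xs with
  | nil => intro full k h1 h2; simp [PySem.List.enumerate_nil, rle]
  | cons x rest ih =>
    intro full k h1 h2
    rw [PySem.List.enumerate_cons, List.filter_cons]
    match rest with
    | [] =>
      have hk : ((k : Int) == (full.length : Int) - 1) = true := by
        simp only [List.length_cons, List.length_nil] at h2
        simp only [beq_iff_eq]; omega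
      simp [hk, PySem.List.enumerate_nil, rle]
    | y :: rest' =>
      have hlen : k + (y :: rest').length + 1 = full.length := by
        simpa [Nat.add_comm, Nat.add_left_comm] using h2
      have hk1 : ((k : Int) == (full.length : Int) - 1) = false := by
        simp only [beq_eq_false_iff_ne, ne_eq]
        simp only [List.length_cons] at hlen
        omega
      have hget : PySem.List.pyGet? full ((k : Int) + 1) = some y := by
        have hc : ((k : Int) + 1) = ((k + 1 : Nat) : Int) := by push_cast; ring
        rw [hc, PySem.List.pyGet?_natCast]
        have hd : (full.drop k)[1]? = some y := by rw [h1]; rfl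
        rw [List.getElem?_drop] at hd
        simpa [Nat.add_comm] using hd
      have h1' : full.drop (k + 1) = y :: rest' := by
        rw [← List.tail_drop, h1]; rfl
      have h2' : (k + 1) + (y :: rest').length = full.length := by
        simp only [List.length_cons] at hlen ⊢; omega
      have ihr := ih full (k + 1) h1' h2'
      have hcast : ((k + 1 : Nat) : Int) = (k : Int) + 1 := by push_cast; ring
      rw [hcast] at ihr
      by_cases hxy : x = y
      · have hpred : (((k : Int) == (full.length : Int) - 1) ||
            !(PySem.List.pyGet? full ((k : Int) + 1) == some x)) = false := by
          rw [hk1, hget, hxy]; simp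
        rw [if_neg (by simp [hpred])]
        rw [rle, if_pos hxy, ihr]
      · have hpred : (((k : Int) == (full.length : Int) - 1) ||
            !(PySem.List.pyGet? full ((k : Int) + 1) == some x)) = true := by
          rw [hk1, hget]; simp [Ne.symm hxy]
        rw [if_pos (by simp [hpred])]
        rw [rle, if_neg hxy, ihr]

-- L10: B's zip/foldl loop equals tripleList
theorem foldl_zip_eq_tripleList (r : List (Int × Int)) :
    ∀ (P K : List Int),
    (r.zip ((r.drop 1).zip (r.drop 2))).foldl
      (fun (acc : List Int × List Int) t =>
        if t.1.2 < t.2.1.2 ∧ t.2.1.2 > t.2.2.2 then (acc.1 ++ [t.2.1.1], acc.2 ++ [t.2.1.2])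
        else acc)
      (P, K)
      = (P ++ (tripleList r).1, K ++ (tripleList r).2) := by
  induction r with
  | nil => intro P K; simp [tripleList]
  | cons a tl ih =>
    intro P K
    match tl with
    | [] => simp [tripleList]
    | [b] => simp [tripleList]
    | b :: c :: rest =>
      obtain ⟨j1, v1⟩ := a
      obtain ⟨j2, v2⟩ := b
      obtain ⟨j3, v3⟩ := c
      rcases hT : tripleList ((j2, v2) :: (j3, v3) :: rest) with ⟨P', K'⟩
      simp only [tripleList, hT, List.drop_succ_cons, List.drop_zero,
        List.zip_cons_cons, List.foldl_cons]
      by_cases hc : v1 < v2 ∧ v2 > v3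
      · rw [if_pos hc, if_pos hc]
        have := ih (P ++ [j2]) (K ++ [v2])
        simp only [List.drop_succ_cons, List.drop_zero, hT] at this
        simp [this]
      · rw [if_neg hc, if_neg hc]
        have := ih P K
        simp only [List.drop_succ_cons, List.drop_zero, hT] at this
        simp [this]

-- ===== VERDICT (by name: the statement is the Claim_ definition above) =====
theorem pick_peaks_spec : Claim_equal_pick_peaks := by
  intro input_list _ hpre
  unfold Spec_pick_peaks
  match input_list with
  | [] => exact absurd rfl hpre
  | x :: tail =>
    -- A's fold = first-difference scan = scanRuns on the enumerated tail
    simp only [pick_peaks, List.foldl_cons]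
    have h0 : pickPeaksStepA ([], [], x, x, "falling", 0) x = ([], [], x, x, "falling", 1) := by
      simp [pickPeaksStepA]
    rw [h0]
    have hAS := pick_peaks_loop tail [] [] x x x "falling" false 1 (Or.inl ⟨rfl, rfl, rfl⟩)
    have hS := foldS_eq_scanRuns tail [] [] x false 1
    norm_num at hS
    -- compress, then shift the open first run into rle of the whole list
    have hRle := scanRuns_rle tail 1 false 0 x
    have hShift := scanRuns_cons_rle tail 0 x
    norm_num at hShift
    obtain ⟨j0, r, hHead⟩ := rle_head tail 0 x
    rw [hHead] at hShift
    -- the scan over compressed runs is the triple selection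
    have hChain := rle_chain (x :: tail) 0
    rw [hHead] at hChain
    have hTrip : scanRuns false j0 x r = tripleList ((j0, x) :: (j0, x) :: r) :=
      scanRuns_eq_tripleList r j0 x x j0 false hChain (by simp)
    have hPre : tripleList ((j0, x) :: (j0, x) :: r) = tripleList ((j0, x) :: r) :=
      tripleList_prefix j0 x j0 x r (lt_irrefl x)
    have hA1 : scanRuns false 0 x (PySem.List.enumerate tail 1) = tripleList ((j0, x) :: r) := by
      rw [hRle, hShift]
      show scanRuns false j0 x r = _
      rw [hTrip, hPre]
    -- B's filtered enumerate is rle, and its zip/foldl loop is the triple selection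
    simp only [pick_peaks_alt]
    have hfilter := filter_eq_rle (x :: tail) (x :: tail) 0 rfl (by simp)
    simp only [Nat.cast_zero] at hfilter
    rw [hfilter, hHead, foldl_zip_eq_tripleList]
    rw [hAS.1, hAS.2, hS.1, hS.2, hA1]
    simp
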